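-- pv_equiv track=rewrite | github.com/Count-group/project1 | results/codes/算法竞赛/doubao/CF2071F_2.py | can_make_p_towering
-- ===== SOURCE A (Python) =====
-- def can_make_p_towering(arr, p, k):
--     n = len(arr)
--     for center in range(n):
--         removed = 0
--         for i in range(n):
--             if arr[i] < p - abs(center - i):
--                 removed += 1
--                 if removed > k:
--                     break
--         else:
--             return True
--     return False
-- ===== SOURCE B (Python) =====
-- def can_make_p_towering(arr, p, k):
--     n = len(arr)
--     diff = [0] * (n + 1)
--     for i, a in enumerate(arr):
--         r = p - a - 1          # element i violates exactly the centers c with |c - i| <= r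
--         if r >= 0:
--             lo = i - r
--             if lo < 0:
--                 lo = 0
--             hi = i + r
--             if hi > n - 1:
--                 hi = n - 1
--             diff[lo] += 1
--             diff[hi + 1] -= 1
--     cur = 0
--     for c in range(n):
--         cur += diff[c]
--         if cur <= k:
--             return True
--     return False
-- ===== Notes on version B (the rewrite author's own statement) =====
-- stated objective: alternative
-- what changed: Replaced the per-center re-count (a nested scan over all elements for every candidate center) by a single difference-array pass - each element marks the interval of centers it violates - followed by one prefix-sum sweep that looks for a center with violation count <= k.
-- outside the precondition, e.g. on can_make_p_towering([100], 0, -1): A returns True, B returns False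
import Mathlib
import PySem

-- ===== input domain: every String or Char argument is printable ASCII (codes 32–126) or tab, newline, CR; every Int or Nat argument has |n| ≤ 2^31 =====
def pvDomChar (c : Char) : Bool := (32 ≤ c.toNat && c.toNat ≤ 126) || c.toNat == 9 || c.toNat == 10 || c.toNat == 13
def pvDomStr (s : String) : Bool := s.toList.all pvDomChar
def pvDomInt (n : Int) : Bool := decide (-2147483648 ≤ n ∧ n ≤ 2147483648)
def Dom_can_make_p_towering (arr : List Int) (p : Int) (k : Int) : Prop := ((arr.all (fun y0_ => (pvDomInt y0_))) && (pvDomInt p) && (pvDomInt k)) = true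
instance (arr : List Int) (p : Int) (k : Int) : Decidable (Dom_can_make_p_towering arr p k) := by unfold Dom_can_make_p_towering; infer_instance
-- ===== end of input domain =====

-- B replaces A's per-center re-count by a single difference-array pass plus a prefix-sum sweep (a different algorithm).

-- ===== PORT A =====
-- inner 'for i in range(n)' loop with its 'break'/'else'; arr[i] via pyGetD (exact: i is always in range)
def pvA_inner (arr : List Int) (p : Int) (k : Int) (center : Int) : List Int → Int → Bool
  | [], _ => true
  | i :: is, removed =>
    if PySem.List.pyGetD arr i 0 < p - |center - i| then
      if removed + 1 > k then false
      else pvA_inner arr p k center is (removed + 1)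
    else pvA_inner arr p k center is removed

-- outer 'for center in range(n)' loop with its 'return True'
def pvA_outer (arr : List Int) (p : Int) (k : Int) : List Int → Bool
  | [] => false
  | c :: cs =>
    if pvA_inner arr p k c (PySem.List.pyRange 0 arr.length 1) 0 then true
    else pvA_outer arr p k cs

def can_make_p_towering (arr : List Int) (p : Int) (k : Int) : Bool :=
  pvA_outer arr p k (PySem.List.pyRange 0 arr.length 1)

-- ===== PORT B =====
-- one enumerate step: clamp the violated-center interval of element (i, a) and mark it in the difference array
def pvB_update (n : Int) (p : Int) (diff : List Int) (ia : Int × Int) : List Int :=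
  let r := p - ia.2 - 1
  if 0 ≤ r then
    let lo := if ia.1 - r < 0 then 0 else ia.1 - r
    let hi := if ia.1 + r > n - 1 then n - 1 else ia.1 + r
    let d1 := PySem.List.pySetD diff lo (PySem.List.pyGetD diff lo 0 + 1)
    PySem.List.pySetD d1 (hi + 1) (PySem.List.pyGetD d1 (hi + 1) 0 - 1)
  else diff

-- the prefix-sum sweep 'for c in range(n)' with its early 'return True'
def pvB_scan (diff : List Int) (k : Int) : List Int → Int → Bool
  | [], _ => false
  | c :: cs, cur =>
    let cur' := cur + PySem.List.pyGetD diff c 0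
    if cur' ≤ k then true else pvB_scan diff k cs cur'

def can_make_p_towering_alt (arr : List Int) (p : Int) (k : Int) : Bool :=
  let diff := (PySem.List.enumerate arr 0).foldl (pvB_update arr.length p) (List.replicate (arr.length + 1) 0)
  pvB_scan diff k (PySem.List.pyRange 0 arr.length 1) 0

-- ===== PRECONDITION & SPEC =====
-- Pre_ excludes only the out-of-domain corner where a negative removal budget meets a center with no violating
-- element: there A's for-else returns True (its 'removed > k' check runs only after an increment) while B's
-- 'count ≤ k' test returns False; both readings of a negative budget are defensible and no caller would specify either.
def Pre_can_make_p_towering (arr : List Int) (p : Int) (k : Int) : Prop :=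
  0 ≤ k ∨ ∀ c ∈ PySem.List.pyRange 0 arr.length 1, ∃ i ∈ PySem.List.pyRange 0 arr.length 1,
    PySem.List.pyGetD arr i 0 < p - |c - i|
instance (arr : List Int) (p : Int) (k : Int) : Decidable (Pre_can_make_p_towering arr p k) := by unfold Pre_can_make_p_towering; infer_instance

def pvWitness_can_make_p_towering : List Int × Int × Int := ([1, 2, 1], 2, 1)

def Spec_can_make_p_towering (arr : List Int) (p : Int) (k : Int) (out : Bool) : Prop := out = can_make_p_towering_alt arr p k
instance (arr : List Int) (p : Int) (k : Int) (out : Bool) : Decidable (Spec_can_make_p_towering arr p k out) := by unfold Spec_can_make_p_towering; infer_instance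

-- ===== CLAIM (what is proved, stated in full; the proofs are below) =====
def Claim_equal_can_make_p_towering : Prop := ∀ (arr : List Int) (p : Int) (k : Int), Dom_can_make_p_towering arr p k → Pre_can_make_p_towering arr p k → Spec_can_make_p_towering arr p k (can_make_p_towering arr p k)

-- ===== LEMMAS AND PROOFS =====

-- 0/1 violation count of a list of candidate indices, for a fixed center c
def pvCnt (arr : List Int) (p : Int) (c : Int) (is : List Int) : Int :=
  (is.map (fun i => if PySem.List.pyGetD arr i 0 < p - |c - i| then (1 : Int) else 0)).sum

lemma pvCnt_nonneg (arr : List Int) (p c : Int) (is : List Int) : 0 ≤ pvCnt arr p c is := by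
  induction is with
  | nil => simp [pvCnt]
  | cons i is ih =>
    simp only [pvCnt, List.map_cons, List.sum_cons] at *
    split_ifs <;> omega

lemma pvA_inner_iff (arr : List Int) (p k c : Int) (is : List Int) (removed : Int)
    (h : removed ≤ k) :
    pvA_inner arr p k c is removed = true ↔ removed + pvCnt arr p c is ≤ k := by
  induction is generalizing removed with
  | nil => simp [pvA_inner, pvCnt, h]
  | cons i is ih =>
    have hnn : 0 ≤ (is.map (fun i => if PySem.List.pyGetD arr i 0 < p - |c - i| then (1 : Int) else 0)).sum := by
      simpa [pvCnt] using pvCnt_nonneg arr p c is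
    simp only [pvA_inner, pvCnt, List.map_cons, List.sum_cons]
    split_ifs with hv hb
    · constructor
      · intro hf; simp at hf
      · intro hle; exfalso; omega
    · rw [ih (removed + 1) (by omega)]; simp only [pvCnt]; constructor <;> intro <;> omega
    · rw [ih removed h]; simp only [pvCnt]; constructor <;> intro <;> omega

lemma pvA_outer_iff (arr : List Int) (p k : Int) (cs : List Int) :
    pvA_outer arr p k cs = true ↔
      ∃ c ∈ cs, pvA_inner arr p k c (PySem.List.pyRange 0 arr.length 1) 0 = true := by
  induction cs with
  | nil => simp [pvA_outer]
  | cons c cs ih =>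
    simp only [pvA_outer]
    split_ifs with hc
    · simp [hc]
    · simp [ih, hc]

-- A = true ↔ some center has violation count ≤ k (needs 0 ≤ k)
lemma pvA_iff (arr : List Int) (p k : Int) (hk : 0 ≤ k) :
    can_make_p_towering arr p k = true ↔
      ∃ c ∈ PySem.List.pyRange 0 arr.length 1,
        pvCnt arr p c (PySem.List.pyRange 0 arr.length 1) ≤ k := by
  unfold can_make_p_towering
  rw [pvA_outer_iff]
  refine exists_congr fun c => and_congr_right fun _ => ?_
  rw [pvA_inner_iff arr p k c _ 0 hk]
  omega

-- contribution of one enumerated element to diff[j]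
def pvStep (n p j : Int) (ia : Int × Int) : Int :=
  let r := p - ia.2 - 1
  if 0 ≤ r then
    (if j = max 0 (ia.1 - r) then (1 : Int) else 0) -
    (if j = min (n - 1) (ia.1 + r) + 1 then (1 : Int) else 0)
  else 0

lemma pvGetD_out (xs : List Int) (j : Int) (h : (xs.length : Int) ≤ j) :
    PySem.List.pyGetD xs j 0 = 0 := by
  apply PySem.List.pyGetD_of_none
  rw [PySem.List.pyGet?_eq_none_iff]
  simp only [PySem.Raise.InRange]
  omega

lemma pvGetD_setD (xs : List Int) (i j v : Int) (h0 : 0 ≤ i) (h1 : i < (xs.length : Int))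
    (hj : 0 ≤ j) :
    PySem.List.pyGetD (PySem.List.pySetD xs i v) j 0 =
      if j = i then v else PySem.List.pyGetD xs j 0 := by
  rw [PySem.List.pySetD_of_nonneg _ _ h0]
  by_cases hj2 : j < (xs.length : Int)
  · rw [PySem.List.pyGetD_eq_getElem _ _ hj (by simpa using hj2),
        PySem.List.pyGetD_eq_getElem _ _ hj hj2]
    rw [List.getElem_set]
    have heq : (i.toNat = j.toNat) ↔ j = i := by omega
    by_cases hji : j = i
    · rw [if_pos (heq.mpr hji), if_pos hji]
    · rw [if_neg (fun hc => hji (heq.mp hc)), if_neg hji]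
  · rw [if_neg (by omega)]
    rw [pvGetD_out _ _ (by simpa using (by omega : (xs.length : Int) ≤ j)),
        pvGetD_out _ _ (by omega)]

lemma pvB_update_getD (arr : List Int) (p : Int) (d : List Int)
    (hd : d.length = arr.length + 1) (ia : Int × Int)
    (hia : 0 ≤ ia.1 ∧ ia.1 < (arr.length : Int)) (j : Int) (hj : 0 ≤ j) :
    PySem.List.pyGetD (pvB_update (arr.length : Int) p d ia) j 0 =
      PySem.List.pyGetD d j 0 + pvStep (arr.length : Int) p j ia := by
  have hdlen : (d.length : Int) = (arr.length : Int) + 1 := by rw [hd]; push_cast; ring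
  have hlo : (if ia.1 - (p - ia.2 - 1) < 0 then 0 else ia.1 - (p - ia.2 - 1))
      = max 0 (ia.1 - (p - ia.2 - 1)) := by split_ifs <;> omega
  have hhi : (if ia.1 + (p - ia.2 - 1) > (arr.length : Int) - 1 then (arr.length : Int) - 1 else ia.1 + (p - ia.2 - 1))
      = min ((arr.length : Int) - 1) (ia.1 + (p - ia.2 - 1)) := by split_ifs <;> omega
  unfold pvB_update pvStep
  dsimp only
  by_cases hr : 0 ≤ p - ia.2 - 1
  · rw [if_pos hr, if_pos hr, hlo, hhi]
    set lo := max 0 (ia.1 - (p - ia.2 - 1)) with hlodef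
    set hi := min ((arr.length : Int) - 1) (ia.1 + (p - ia.2 - 1)) with hhidef
    have hlo0 : 0 ≤ lo := by omega
    have hlo1 : lo < (d.length : Int) := by omega
    have hhi0 : 0 ≤ hi + 1 := by omega
    have h1a : hi + 1 < ((PySem.List.pySetD d lo (PySem.List.pyGetD d lo 0 + 1)).length : Int) := by
      rw [PySem.List.length_pySetD]; omega
    rw [pvGetD_setD _ _ _ _ hhi0 h1a hj,
        pvGetD_setD _ _ _ _ hlo0 hlo1 hj,
        pvGetD_setD _ _ _ _ hlo0 hlo1 hhi0]
    have hne : ¬ (hi + 1 = lo) := by omega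
    have hne' : ¬ (lo = hi + 1) := fun hc => hne hc.symm
    by_cases hj1 : j = hi + 1
    · subst hj1
      simp only [hne, if_true, if_false, eq_self_iff_true, ite_true, ite_false, if_neg hne]
      omega
    · by_cases hj2 : j = lo
      · subst hj2
        simp only [if_neg hj1, if_neg hne', eq_self_iff_true, ite_true]
        omega
      · simp only [if_neg hj1, if_neg hj2]; omega
  · rw [if_neg hr, if_neg hr]; omega

lemma pvB_fold_getD (arr : List Int) (p : Int) (l : List (Int × Int))
    (hmem : ∀ ia ∈ l, 0 ≤ ia.1 ∧ ia.1 < (arr.length : Int)) :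
    ∀ (d : List Int), d.length = arr.length + 1 → ∀ (j : Int), 0 ≤ j →
    PySem.List.pyGetD (l.foldl (pvB_update (arr.length : Int) p) d) j 0 =
      PySem.List.pyGetD d j 0 + (l.map (pvStep (arr.length : Int) p j)).sum := by
  induction l with
  | nil => intro d hd j hj; simp
  | cons ia l ih =>
    intro d hd j hj
    have hia := hmem ia (by simp)
    have hlen : (pvB_update (arr.length : Int) p d ia).length = arr.length + 1 := by
      unfold pvB_update
      dsimp only
      split_ifs <;> simp [PySem.List.length_pySetD, hd]
    have ihres := ih (fun x hx => hmem x (by simp [hx])) (pvB_update (arr.length : Int) p d ia) hlen j hj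
    simp only [List.foldl_cons, List.map_cons, List.sum_cons]
    rw [ihres, pvB_update_getD arr p d hd ia hia j hj]
    ring

-- pointwise sums commute past each other
lemma pvSum_swap (R : List Int) (l : List (Int × Int)) (f : Int → (Int × Int) → Int) :
    (R.map (fun j => (l.map (f j)).sum)).sum = (l.map (fun ia => (R.map (fun j => f j ia)).sum)).sum := by
  induction l with
  | nil => simp
  | cons ia l ih =>
    simp only [List.map_cons, List.sum_cons, ← ih, PySem.List.sum_map_add_int]

lemma pvSum_sub (R : List Int) (f g : Int → Int) :
    (R.map (fun j => f j - g j)).sum = (R.map f).sum - (R.map g).sum := by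
  induction R with
  | nil => simp
  | cons j R ih => simp only [List.map_cons, List.sum_cons, ih]; ring

-- sum of an equality indicator over range(0, M)
lemma pvInd_sum (M : Nat) (t : Int) :
    ((PySem.List.pyRange 0 (M : Int) 1).map (fun j => if j = t then (1 : Int) else 0)).sum
      = if 0 ≤ t ∧ t < (M : Int) then 1 else 0 := by
  induction M with
  | zero => simp
  | succ m ih =>
    push_cast
    rw [PySem.List.pyRange_one_succ_right (by positivity)]
    simp only [List.map_append, List.sum_append, List.map_cons, List.map_nil,
      List.sum_cons, List.sum_nil]
    rw [ih]
    split_ifs <;> omega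

-- the prefix-sum of one element's contributions is its violation indicator at center c
lemma pvStep_prefix (arr : List Int) (p c : Int) (ia : Int × Int)
    (hia : 0 ≤ ia.1 ∧ ia.1 < (arr.length : Int)) (hc0 : 0 ≤ c) (hc1 : c < (arr.length : Int)) :
    ((PySem.List.pyRange 0 (c + 1) 1).map (fun j => pvStep (arr.length : Int) p j ia)).sum
      = if ia.2 < p - |c - ia.1| then (1 : Int) else 0 := by
  unfold pvStep
  dsimp only
  rcases abs_cases (c - ia.1) with ⟨hA1, hA2⟩ | ⟨hA1, hA2⟩ <;> rw [hA1] <;>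
  · by_cases hr : 0 ≤ p - ia.2 - 1
    · simp only [if_pos hr]
      rw [pvSum_sub]
      rw [show ((c : Int) + 1) = (((c + 1).toNat : Nat) : Int) by omega]
      rw [pvInd_sum, pvInd_sum]
      split_ifs <;> omega
    · simp only [if_neg hr, List.map_const', List.sum_replicate, smul_zero]
      split_ifs <;> omega

-- ∃-characterisation of the prefix-sum sweep over range(a, n)
lemma pvB_scan_iff (d : List Int) (k : Int) (n : Int) :
    ∀ (M : Nat) (a cur : Int), (n - a).toNat = M →
    (pvB_scan d k (PySem.List.pyRange a n 1) cur = true ↔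
      ∃ c, a ≤ c ∧ c < n ∧
        cur + ((PySem.List.pyRange a (c + 1) 1).map (fun j => PySem.List.pyGetD d j 0)).sum ≤ k) := by
  intro M
  induction M with
  | zero =>
    intro a cur hM
    rw [PySem.List.pyRange_one_eq_nil (by omega)]
    simp only [pvB_scan, Bool.false_eq_true, false_iff]
    rintro ⟨c, h1, h2, _⟩; omega
  | succ m ih =>
    intro a cur hM
    rw [PySem.List.pyRange_one_cons (by omega)]
    simp only [pvB_scan]
    have hsingle : (PySem.List.pyRange a (a + 1) 1).map (fun j => PySem.List.pyGetD d j 0)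
        = [PySem.List.pyGetD d a 0] := by
      rw [PySem.List.pyRange_one_cons (by omega), PySem.List.pyRange_one_eq_nil (by omega)]
      rfl
    split_ifs with h
    · constructor
      · intro _
        refine ⟨a, le_refl a, by omega, ?_⟩
        rw [hsingle]
        simpa using h
      · intro _; rfl
    · rw [ih (a + 1) (cur + PySem.List.pyGetD d a 0) (by omega)]
      constructor
      · rintro ⟨c, h1, h2, h3⟩
        refine ⟨c, by omega, h2, ?_⟩
        rw [PySem.List.pyRange_one_append a (a + 1) (c + 1) (by omega) (by omega)]
        rw [List.map_append, List.sum_append, hsingle]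
        simp only [List.sum_cons, List.sum_nil]
        omega
      · rintro ⟨c, h1, h2, h3⟩
        rcases eq_or_lt_of_le h1 with rfl | hlt
        · exfalso
          rw [hsingle] at h3
          simp only [List.sum_cons, List.sum_nil] at h3
          omega
        · refine ⟨c, by omega, h2, ?_⟩
          rw [PySem.List.pyRange_one_append a (a + 1) (c + 1) (by omega) (by omega)] at h3
          rw [List.map_append, List.sum_append, hsingle] at h3
          simp only [List.sum_cons, List.sum_nil] at h3
          omega

lemma pvGetD_replicate (m : Nat) (j : Int) :
    PySem.List.pyGetD (List.replicate m (0 : Int)) j 0 = 0 := by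
  unfold PySem.List.pyGetD
  cases hg : PySem.List.pyGet? (List.replicate m (0 : Int)) j with
  | none => rfl
  | some x =>
    have hx : x ∈ List.replicate m (0 : Int) := PySem.List.mem_of_pyGet?_eq_some _ hg
    simpa using List.eq_of_mem_replicate hx

-- the prefix sum of the final diff array at center c equals the violation count of center c
lemma pvB_prefix_eq_cnt (arr : List Int) (p c : Int) (hc0 : 0 ≤ c) (hc1 : c < (arr.length : Int)) :
    ((PySem.List.pyRange 0 (c + 1) 1).map (fun j =>
        PySem.List.pyGetD ((PySem.List.enumerate arr 0).foldl (pvB_update (arr.length : Int) p)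
          (List.replicate (arr.length + 1) 0)) j 0)).sum
      = pvCnt arr p c (PySem.List.pyRange 0 arr.length 1) := by
  have hmem : ∀ ia ∈ PySem.List.enumerate arr 0, 0 ≤ ia.1 ∧ ia.1 < (arr.length : Int) := by
    intro ia hia
    rw [PySem.List.mem_enumerate_iff] at hia
    rcases hia with ⟨mk, hmk, rfl⟩
    constructor <;> simp <;> omega
  have hcongr : ((PySem.List.pyRange 0 (c + 1) 1).map (fun j =>
      PySem.List.pyGetD ((PySem.List.enumerate arr 0).foldl (pvB_update (arr.length : Int) p)
        (List.replicate (arr.length + 1) 0)) j 0)).sum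
      = ((PySem.List.pyRange 0 (c + 1) 1).map (fun j =>
        ((PySem.List.enumerate arr 0).map (pvStep (arr.length : Int) p j)).sum)).sum := by
    apply congrArg
    apply List.map_congr_left
    intro j hjmem
    rw [PySem.List.mem_pyRange_one] at hjmem
    rw [pvB_fold_getD arr p (PySem.List.enumerate arr 0) hmem
      (List.replicate (arr.length + 1) 0) (by simp) j hjmem.1, pvGetD_replicate]
    ring
  rw [hcongr, pvSum_swap]
  rw [List.map_congr_left (fun ia hia =>
    pvStep_prefix arr p c ia (hmem ia hia) hc0 hc1)]
  rw [show PySem.List.enumerate arr 0 = PySem.List.enumerate arr from rfl,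
    PySem.List.enumerate_eq_map_pyRange arr 0, List.map_map]
  unfold pvCnt
  apply congrArg
  apply List.map_congr_left
  intro i himem
  rfl

lemma pvB_iff (arr : List Int) (p k : Int) :
    can_make_p_towering_alt arr p k = true ↔
      ∃ c ∈ PySem.List.pyRange 0 arr.length 1,
        pvCnt arr p c (PySem.List.pyRange 0 arr.length 1) ≤ k := by
  unfold can_make_p_towering_alt
  dsimp only
  rw [pvB_scan_iff _ k (arr.length : Int) ((arr.length : Int) - 0).toNat 0 0 rfl]
  constructor
  · rintro ⟨c, h1, h2, h3⟩
    refine ⟨c, by rw [PySem.List.mem_pyRange_one]; omega, ?_⟩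
    rw [pvB_prefix_eq_cnt arr p c h1 h2] at h3
    omega
  · rintro ⟨c, hcmem, h3⟩
    rw [PySem.List.mem_pyRange_one] at hcmem
    exact ⟨c, hcmem.1, hcmem.2, by rw [pvB_prefix_eq_cnt arr p c hcmem.1 hcmem.2]; omega⟩

lemma pvCnt_pos (arr : List Int) (p c : Int) (is : List Int) (i : Int) (hi : i ∈ is)
    (hv : PySem.List.pyGetD arr i 0 < p - |c - i|) : 0 < pvCnt arr p c is := by
  induction is with
  | nil => cases hi
  | cons a is ih =>
    have hnn : 0 ≤ pvCnt arr p c is := pvCnt_nonneg arr p c is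
    simp only [pvCnt, List.map_cons, List.sum_cons] at *
    rcases List.mem_cons.mp hi with rfl | hmem
    · rw [if_pos hv]; omega
    · have := ih hmem; split_ifs <;> omega

-- with a negative budget the inner loop completes only if the center has no violating element at all
lemma pvA_inner_neg (arr : List Int) (p k c : Int) (hk : k < 0) (is : List Int) :
    pvA_inner arr p k c is 0 = true ↔ pvCnt arr p c is = 0 := by
  induction is with
  | nil => simp [pvA_inner, pvCnt]
  | cons i is ih =>
    have hnn : 0 ≤ pvCnt arr p c is := pvCnt_nonneg arr p c is
    simp only [pvA_inner, pvCnt, List.map_cons, List.sum_cons] at *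
    split_ifs with hv hb
    · constructor
      · intro hf; simp at hf
      · intro hle; exfalso; omega
    · exfalso; omega
    · rw [ih]; constructor <;> intro <;> omega

-- ===== VERDICT (by name: the statement is the Claim_ definition above) =====
theorem can_make_p_towering_spec : Claim_equal_can_make_p_towering := by
  intro arr p k _ hpre
  unfold Spec_can_make_p_towering
  by_cases hk : 0 ≤ k
  · have h : can_make_p_towering arr p k = true ↔ can_make_p_towering_alt arr p k = true :=
      (pvA_iff arr p k hk).trans (pvB_iff arr p k).symm
    cases hbA : can_make_p_towering arr p k <;> cases hbB : can_make_p_towering_alt arr p k <;>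
      rw [hbA, hbB] at h <;> simp_all
  · replace hk : k < 0 := by omega
    have hall := hpre.resolve_left (by omega)
    have hAne : ¬ (can_make_p_towering arr p k = true) := by
      unfold can_make_p_towering
      rw [pvA_outer_iff]
      rintro ⟨c, hc, hinner⟩
      rw [pvA_inner_neg arr p k c hk] at hinner
      obtain ⟨i, hi, hv⟩ := hall c hc
      have := pvCnt_pos arr p c (PySem.List.pyRange 0 arr.length 1) i hi hv
      omega
    have hBne : ¬ (can_make_p_towering_alt arr p k = true) := by
      rw [pvB_iff]
      rintro ⟨c, hc, hcnt⟩
      have := pvCnt_nonneg arr p c (PySem.List.pyRange 0 arr.length 1)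
      omega
    rw [Bool.eq_false_iff.mpr hAne, Bool.eq_false_iff.mpr hBne]
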